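-- pv_equiv track=rewrite | github.com/ddw02141/leetcode | DP/2140.py | mostPoints
-- ===== SOURCE A (Python) =====
-- from typing import List
--
-- def mostPoints(q: List[List[int]]) -> int:
--     # dp[i]: possible max point starts from q[i]
--     n = len(q)
--     dp = [0 for _ in range(n + 1)]
--     for i in range(n)[::-1]:
--         if i + q[i][1] + 1 >= n:
--             dp[i] = max(dp[i + 1], q[i][0])
--         else:
--             dp[i] = max(dp[i + 1], q[i][0] + dp[i + q[i][1] + 1])
--
--     return dp[0]
-- ===== SOURCE B (Python) =====
-- from typing import List
--
-- def mostPoints(q: List[List[int]]) -> int: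
--     # forward push DP: dp[i] = best points accumulated upon arriving at index i
--     n = len(q)
--     dp = [0] * (n + 1)
--     for i in range(n):
--         dp[i + 1] = max(dp[i + 1], dp[i])
--         j = min(i + q[i][1] + 1, n)
--         dp[j] = max(dp[j], dp[i] + q[i][0])
--     return dp[n]
-- ===== Notes on version B (the rewrite author's own statement) =====
-- stated objective: alternative
-- what changed: Replaces A's backward pull DP (dp[i] = best from question i, filled right-to-left) by a forward push DP over arrival states (dp[i] = best points accumulated upon arriving at index i, relaxing the skip and solve transitions left-to-right and returning dp[n]).
-- outside the precondition, e.g. on mostPoints([[5, -3]]): A returns 5, B returns 0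
import Mathlib
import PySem

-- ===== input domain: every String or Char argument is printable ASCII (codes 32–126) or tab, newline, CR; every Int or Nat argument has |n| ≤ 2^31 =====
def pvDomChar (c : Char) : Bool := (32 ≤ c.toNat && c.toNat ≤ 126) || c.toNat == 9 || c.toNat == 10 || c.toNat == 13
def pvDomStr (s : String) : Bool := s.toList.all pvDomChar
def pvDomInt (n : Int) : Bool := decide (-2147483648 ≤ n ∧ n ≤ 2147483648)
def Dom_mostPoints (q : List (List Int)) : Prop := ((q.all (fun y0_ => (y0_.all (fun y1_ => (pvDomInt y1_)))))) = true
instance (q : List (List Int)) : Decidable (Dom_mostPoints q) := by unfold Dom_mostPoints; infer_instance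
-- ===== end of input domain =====

-- B is a forward push DP over arrival states instead of A's backward pull DP; return values are proved equal on Pre_.

-- ===== PORT A =====
-- backward fill: dp[i] = best points obtainable starting from question i
def mostPoints (q : List (List Int)) : Int :=
  let n := q.length
  let dp0 : List Int := List.replicate (n + 1) 0
  let dp := (List.range n).reverse.foldl (fun dp (i : Nat) =>
    let p := (q.getD i []).getD 0 0
    let b := (q.getD i []).getD 1 0
    if (n : Int) ≤ (i : Int) + b + 1 then
      dp.set i (max (dp.getD (i + 1) 0) p)
    else
      dp.set i (max (dp.getD (i + 1) 0) (p + dp.getD ((i : Int) + b + 1).toNat 0))) dp0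
  dp.getD 0 0

-- ===== PORT B =====
-- forward push: dp[i] = best points accumulated upon arriving at index i
def mostPoints_alt (q : List (List Int)) : Int :=
  let n := q.length
  let dp0 : List Int := List.replicate (n + 1) 0
  let dp := (List.range n).foldl (fun dp (i : Nat) =>
    let dp1 := dp.set (i + 1) (max (dp.getD (i + 1) 0) (dp.getD i 0))
    let j := (min ((i : Int) + (q.getD i []).getD 1 0 + 1) (n : Int)).toNat
    dp1.set j (max (dp1.getD j 0) (dp1.getD i 0 + (q.getD i []).getD 0 0))) dp0
  dp.getD n 0

-- ===== PRECONDITION & SPEC =====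
-- Pre_ excludes questions with fewer than two entries (A raises IndexError) and negative brainpower
-- values, which lie outside the problem's natural domain: there A's value comes from Python's
-- negative-index wraparound / reading cells the backward fill has not yet written.
def Pre_mostPoints (q : List (List Int)) : Prop :=
  ∀ r ∈ q, 2 ≤ r.length ∧ 0 ≤ r.getD 1 0
instance (q : List (List Int)) : Decidable (Pre_mostPoints q) := by unfold Pre_mostPoints; infer_instance

def pvWitness_mostPoints : List (List Int) := [[3, 2], [4, 3], [4, 4], [2, 5]]

def Spec_mostPoints (q : List (List Int)) (out : Int) : Prop := out = mostPoints_alt q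
instance (q : List (List Int)) (out : Int) : Decidable (Spec_mostPoints q out) := by unfold Spec_mostPoints; infer_instance

-- ===== CLAIM (what is proved, stated in full; the proofs are below) =====
def Claim_equal_mostPoints : Prop := ∀ (q : List (List Int)), Dom_mostPoints q → Pre_mostPoints q → Spec_mostPoints q (mostPoints q)

-- ===== LEMMAS AND PROOFS =====

-- the points of question i
def pV (q : List (List Int)) (i : Nat) : Int := (q.getD i []).getD 0 0
-- the brainpower of question i, as a Nat (equals the Python value under Pre_)
def bN (q : List (List Int)) (i : Nat) : Nat := ((q.getD i []).getD 1 0).toNat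
-- the clamped jump target after solving question i
def kI (q : List (List Int)) (i : Nat) : Nat := min (i + bN q i + 1) q.length

lemma kI_gt (q : List (List Int)) (i : Nat) (h : i < q.length) : i < kI q i := by
  unfold kI; omega

-- the value function: best points obtainable starting from question i
def Vf (q : List (List Int)) (i : Nat) : Int :=
  if h : i < q.length then max (Vf q (i + 1)) (pV q i + Vf q (kI q i)) else 0
termination_by q.length - i
decreasing_by
  · omega
  · have := kI_gt q i h; omega

lemma Vf_stop (q : List (List Int)) (i : Nat) (h : q.length ≤ i) : Vf q i = 0 := by
  rw [Vf]; simp [Nat.not_lt.mpr h]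

lemma Vf_step (q : List (List Int)) (i : Nat) (h : i < q.length) :
    Vf q i = max (Vf q (i + 1)) (pV q i + Vf q (kI q i)) := by
  rw [Vf]; simp [h]

lemma Vf_anti (q : List (List Int)) (i : Nat) : Vf q (i + 1) ≤ Vf q i := by
  by_cases h : i < q.length
  · rw [Vf_step q i h]; exact le_max_left _ _
  · rw [Vf_stop q i (by omega), Vf_stop q (i + 1) (by omega)]

lemma getD_set_self (l : List Int) (i : Nat) (v : Int) (h : i < l.length) :
    (l.set i v).getD i 0 = v := by
  simp [List.getD_eq_getElem?_getD, h]

lemma getD_set_ne (l : List Int) (i j : Nat) (v : Int) (h : i ≠ j) :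
    (l.set i v).getD j 0 = l.getD j 0 := by
  simp [List.getD_eq_getElem?_getD, List.getElem?_set_ne h]

-- arithmetic facts under Pre_
lemma pre_facts (q : List (List Int)) (hpre : Pre_mostPoints q) (i : Nat) (h : i < q.length) :
    (q.getD i []).getD 1 0 = (bN q i : Int) := by
  have hmem : q.getD i [] ∈ q := by
    rw [List.getD_eq_getElem?_getD, List.getElem?_eq_getElem h]
    exact List.getElem_mem h
  have := (hpre _ hmem).2
  unfold bN; omega

-- ===== A-side: backward fold computes Vf =====

def stepA (q : List (List Int)) (dp : List Int) (i : Nat) : List Int :=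
  let p := (q.getD i []).getD 0 0
  let b := (q.getD i []).getD 1 0
  if (q.length : Int) ≤ (i : Int) + b + 1 then
    dp.set i (max (dp.getD (i + 1) 0) p)
  else
    dp.set i (max (dp.getD (i + 1) 0) (p + dp.getD ((i : Int) + b + 1).toNat 0))

lemma stepA_invariant (q : List (List Int)) (hpre : Pre_mostPoints q) (dp : List Int)
    (hlen : dp.length = q.length + 1) (i : Nat) (hi : i < q.length)
    (hinv : ∀ j, i + 1 ≤ j → dp.getD j 0 = Vf q j) :
    (stepA q dp i).length = q.length + 1 ∧ ∀ j, i ≤ j → (stepA q dp i).getD j 0 = Vf q j := by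
  have hb := pre_facts q hpre i hi
  have hval : stepA q dp i = dp.set i (Vf q i) := by
    unfold stepA
    rw [hb]
    have hVi := Vf_step q i hi
    by_cases hc : (q.length : Int) ≤ (i : Int) + (bN q i : Int) + 1
    · have hk : kI q i = q.length := by unfold kI; omega
      simp only [if_pos hc, hinv (i + 1) (le_refl _), hVi, hk,
        Vf_stop q q.length (le_refl _), pV, add_zero]
    · have hk : kI q i = i + bN q i + 1 := by unfold kI; omega
      have ht : ((i : Int) + (bN q i : Int) + 1).toNat = i + bN q i + 1 := by omega
      simp only [if_neg hc, ht, hinv (i + 1) (le_refl _),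
        hinv (i + bN q i + 1) (by omega), hVi, hk, pV]
  rw [hval]
  refine ⟨by simp [hlen], fun j hj => ?_⟩
  rcases eq_or_ne i j with rfl | hne
  · exact getD_set_self dp i _ (by omega)
  · rw [getD_set_ne dp i j _ hne]; exact hinv j (by omega)

lemma foldA (q : List (List Int)) (hpre : Pre_mostPoints q) :
    ∀ (i : Nat) (dp : List Int), i ≤ q.length → dp.length = q.length + 1 →
    (∀ j, i ≤ j → dp.getD j 0 = Vf q j) →
    ∀ j, ((List.range i).reverse.foldl (stepA q) dp).getD j 0 = Vf q j := by
  intro i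
  induction i with
  | zero => intro dp _ _ hinv j; simpa using hinv j (Nat.zero_le j)
  | succ m ih =>
    intro dp hle hlen hinv j
    have hrev : (List.range (m + 1)).reverse = m :: (List.range m).reverse := by
      rw [List.range_succ, List.reverse_append]; rfl
    rw [hrev, List.foldl_cons]
    obtain ⟨h1, h2⟩ := stepA_invariant q hpre dp hlen m (by omega) (fun j hj => hinv j hj)
    exact ih (stepA q dp m) (by omega) h1 h2 j

lemma mostPoints_eq_Vf (q : List (List Int)) (hpre : Pre_mostPoints q) :
    mostPoints q = Vf q 0 := by
  exact foldA q hpre q.length (List.replicate (q.length + 1) 0) (le_refl _)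
    (by simp) (fun j hj => by rw [Vf_stop q j hj]; simp [List.getD_eq_getElem?_getD]) 0

-- ===== B-side: forward fold computes Vf =====

def stepB (q : List (List Int)) (dp : List Int) (i : Nat) : List Int :=
  let dp1 := dp.set (i + 1) (max (dp.getD (i + 1) 0) (dp.getD i 0))
  let j := (min ((i : Int) + (q.getD i []).getD 1 0 + 1) (q.length : Int)).toNat
  dp1.set j (max (dp1.getD j 0) (dp1.getD i 0 + (q.getD i []).getD 0 0))

-- Mf dp i = max over j in [i, n] of dp[j] + Vf j (with the j = n term always present)
def Mf (q : List (List Int)) (dp : List Int) (i : Nat) : Int :=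
  if h : i < q.length then max (dp.getD i 0 + Vf q i) (Mf q dp (i + 1)) else dp.getD q.length 0
termination_by q.length - i

lemma Mf_stop (q : List (List Int)) (dp : List Int) (i : Nat) (h : q.length ≤ i) :
    Mf q dp i = dp.getD q.length 0 := by
  rw [Mf]; simp [Nat.not_lt.mpr h]

lemma Mf_step (q : List (List Int)) (dp : List Int) (i : Nat) (h : i < q.length) :
    Mf q dp i = max (dp.getD i 0 + Vf q i) (Mf q dp (i + 1)) := by
  rw [Mf]; simp [h]

lemma Mf_set_lt (q : List (List Int)) (dp : List Int) (i j : Nat) (v : Int)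
    (hji : j < i) (hjn : j < q.length) : Mf q (dp.set j v) i = Mf q dp i := by
  by_cases h : i < q.length
  · rw [Mf_step _ _ _ h, Mf_step _ _ _ h, getD_set_ne dp j i v (by omega),
      Mf_set_lt q dp (i + 1) j v (by omega) hjn]
  · rw [Mf_stop _ _ _ (by omega), Mf_stop _ _ _ (by omega),
      getD_set_ne dp j q.length v (by omega)]
termination_by q.length - i

lemma Mf_bump (q : List (List Int)) (dp : List Int) (i j : Nat) (x : Int)
    (hlen : q.length < dp.length) (hij : i ≤ j) (hjn : j ≤ q.length) :
    Mf q (dp.set j (max (dp.getD j 0) x)) i = max (Mf q dp i) (x + Vf q j) := by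
  by_cases h : i < q.length
  · rw [Mf_step _ _ _ h, Mf_step _ _ _ h]
    rcases eq_or_ne i j with rfl | hne
    · rw [getD_set_self dp i _ (by omega), Mf_set_lt q dp (i + 1) i _ (by omega) (by omega)]
      omega
    · rw [getD_set_ne dp j i _ (by omega), Mf_bump q dp (i + 1) j x hlen (by omega) hjn]
      omega
  · have hji : j = q.length := by omega
    subst hji
    rw [Mf_stop _ _ _ (by omega), Mf_stop _ _ _ (by omega),
      getD_set_self dp q.length _ (by omega), Vf_stop q q.length (le_refl _)]
    omega
termination_by q.length - i

lemma stepB_preserves (q : List (List Int)) (hpre : Pre_mostPoints q) (dp : List Int)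
    (hlen : dp.length = q.length + 1) (i : Nat) (hi : i < q.length) :
    (stepB q dp i).length = q.length + 1 ∧ Mf q (stepB q dp i) (i + 1) = Mf q dp i := by
  have hb := pre_facts q hpre i hi
  have ht : (min ((i : Int) + (q.getD i []).getD 1 0 + 1) (q.length : Int)).toNat = kI q i := by
    rw [hb]; unfold kI; omega
  have hk1 : i < kI q i := kI_gt q i hi
  have hkn : kI q i ≤ q.length := by unfold kI; omega
  have hstep : stepB q dp i =
      (dp.set (i + 1) (max (dp.getD (i + 1) 0) (dp.getD i 0))).set (kI q i)
        (max ((dp.set (i + 1) (max (dp.getD (i + 1) 0) (dp.getD i 0))).getD (kI q i) 0)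
          ((dp.set (i + 1) (max (dp.getD (i + 1) 0) (dp.getD i 0))).getD i 0
            + (q.getD i []).getD 0 0)) := by
    unfold stepB; rw [ht]
  rw [hstep]
  set dp1 := dp.set (i + 1) (max (dp.getD (i + 1) 0) (dp.getD i 0)) with hdp1
  have hd1i : dp1.getD i 0 = dp.getD i 0 := getD_set_ne dp (i + 1) i _ (by omega)
  have hd1len : dp1.length = q.length + 1 := by simp [hdp1, hlen]
  constructor
  · simp [hd1len]
  · rw [hd1i]
    rw [Mf_bump q dp1 (i + 1) (kI q i) _ (by omega) (by omega) hkn]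
    rw [hdp1, Mf_bump q dp (i + 1) (i + 1) _ (by omega) (le_refl _) (by omega)]
    rw [Mf_step q dp i hi, Vf_step q i hi]
    have hpv : pV q i = (q.getD i []).getD 0 0 := rfl
    rw [hpv]
    omega

lemma Mf_zeros (q : List (List Int)) (i : Nat) (hi : i ≤ q.length) :
    Mf q (List.replicate (q.length + 1) 0) i = Vf q i := by
  by_cases h : i < q.length
  · rw [Mf_step _ _ _ h, Mf_zeros q (i + 1) (by omega)]
    have : (List.replicate (q.length + 1) (0 : Int)).getD i 0 = 0 := by
      simp [List.getD_eq_getElem?_getD]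
    rw [this]
    have := Vf_anti q i
    omega
  · have hi' : i = q.length := by omega
    subst hi'
    rw [Mf_stop _ _ _ (le_refl _), Vf_stop q _ (le_refl _)]
    simp [List.getD_eq_getElem?_getD]
termination_by q.length - i

lemma foldB (q : List (List Int)) (hpre : Pre_mostPoints q) :
    ∀ (m i : Nat) (dp : List Int), q.length - i = m → i ≤ q.length →
    dp.length = q.length + 1 →
    ((List.range' i m).foldl (stepB q) dp).getD q.length 0 = Mf q dp i := by
  intro m
  induction m with
  | zero =>
    intro i dp hm hle hlen
    have : i = q.length := by omega
    subst this
    simp [Mf_stop q dp q.length (le_refl _)]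
  | succ m ih =>
    intro i dp hm hle hlen
    have hi : i < q.length := by omega
    obtain ⟨h1, h2⟩ := stepB_preserves q hpre dp hlen i hi
    rw [List.range'_succ, List.foldl_cons, ih (i + 1) (stepB q dp i) (by omega) (by omega) h1, h2]

lemma mostPoints_alt_eq_Vf (q : List (List Int)) (hpre : Pre_mostPoints q) :
    mostPoints_alt q = Vf q 0 := by
  have h := foldB q hpre q.length 0 (List.replicate (q.length + 1) 0) (by omega) (by omega) (by simp)
  have hr : List.range q.length = List.range' 0 q.length := List.range_eq_range'
  unfold mostPoints_alt
  dsimp only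
  rw [hr]
  exact h.trans (Mf_zeros q 0 (by omega))

-- ===== VERDICT (by name: the statement is the Claim_ definition above) =====
theorem mostPoints_spec : Claim_equal_mostPoints := by
  intro q _ hpre
  unfold Spec_mostPoints
  rw [mostPoints_eq_Vf q hpre, mostPoints_alt_eq_Vf q hpre]
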